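-- pv_equiv track=rewrite | github.com/HericPan/ICS33-Records | ICS 33 Official/Quiz 1/3-4/q4b_new.py | by_skill
-- ===== SOURCE A (Python) =====
-- def by_skill(db1: {str : { str : int } }) -> [ (int, [(str, [str]) ] ) ]:
--     records = list
--     outerdict = dict()
--     for chosen_level in range(5, 0, -1):
--         outerdict[chosen_level] = dict()
--         innerdict = outerdict[chosen_level]
--
--         # now iterate through db to get each skill_name and add qualified people into the list
--         for name,skill_set in db1.items():
--             for skill_name, skill_level in skill_set.items():
--                 if skill_level == chosen_level:
--                     if skill_name not in innerdict:
--                         innerdict[skill_name] = []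
--                     innerdict[skill_name].append(name)
--     record = sorted([(level, sorted([(skill_name, sorted(name)) for skill_name,name in skills.items()], key=(lambda t:t[0]))) for level, skills in outerdict.items()], key=(lambda t: -t[0]))
--     return record
-- ===== SOURCE B (Python) =====
-- def by_skill(db1: {str: {str: int}}) -> [(int, [(str, [str])])]:
--     # simpler: one pass over the database instead of one pass per level
--     levels = {lvl: {} for lvl in range(5, 0, -1)}
--     for name, skill_set in db1.items():
--         for skill_name, skill_level in skill_set.items():
--             if skill_level in levels:
--                 levels[skill_level].setdefault(skill_name, []).append(name)
--     return [(lvl, sorted(((sn, sorted(ns)) for sn, ns in levels[lvl].items()),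
--                          key=(lambda t: t[0])))
--             for lvl in range(5, 0, -1)]
-- ===== Notes on version B (the rewrite author's own statement) =====
-- stated objective: simpler
-- what changed: B groups in a single pass over the database into a pre-seeded level->skill->names dict via setdefault, instead of A's one full pass over the whole database per level, and emits levels 5..1 directly instead of re-sorting the level list.
import Mathlib
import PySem

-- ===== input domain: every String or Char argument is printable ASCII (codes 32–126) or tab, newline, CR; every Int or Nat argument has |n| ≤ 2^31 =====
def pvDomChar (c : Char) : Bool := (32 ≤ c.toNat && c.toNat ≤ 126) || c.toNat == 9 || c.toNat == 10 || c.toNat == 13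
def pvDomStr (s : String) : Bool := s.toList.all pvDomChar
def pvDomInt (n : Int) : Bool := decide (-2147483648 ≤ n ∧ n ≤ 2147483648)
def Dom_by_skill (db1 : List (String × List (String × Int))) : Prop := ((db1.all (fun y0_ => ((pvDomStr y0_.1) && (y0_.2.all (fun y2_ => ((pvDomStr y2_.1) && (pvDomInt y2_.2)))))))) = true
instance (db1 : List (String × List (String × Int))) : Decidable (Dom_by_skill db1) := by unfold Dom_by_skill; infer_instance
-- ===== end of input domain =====

-- ===== PORT A =====
-- B replaces A's five passes over the database (one per level) by one pass into a
-- pre-seeded level->skill->names dict; objective: simpler.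

-- A's inner-loop body: 'if skill_name not in innerdict: innerdict[skill_name] = []' then append
def innerStepA (d : PySem.Dict String (List String)) (name sn : String) : PySem.Dict String (List String) :=
  let d1 := if d.contains sn then d else d.insert sn []
  d1.modify sn [] (fun ns => ns ++ [name])

def by_skill (db1 : List (String × List (String × Int))) : List (Int × (List (String × List String))) :=
  let outerdict := (PySem.List.pyRange 5 0 (-1)).foldl (fun outer cl =>
    let inner := db1.foldl (fun inner p =>
        p.2.foldl (fun inner q => if q.2 == cl then innerStepA inner p.1 q.1 else inner) inner)
      PySem.Dict.empty
    outer.insert cl inner) PySem.Dict.empty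
  PySem.List.sorted (outerdict.items.map (fun lv =>
      (lv.1, PySem.List.sorted (lv.2.items.map (fun sv => (sv.1, PySem.List.sorted sv.2 (fun x => x) false)))
               (fun t => t.1) false)))
    (fun t => -t.1) false

-- ===== PORT B =====
def by_skill_alt (db1 : List (String × List (String × Int))) : List (Int × (List (String × List String))) :=
  let levels0 := (PySem.List.pyRange 5 0 (-1)).foldl (fun d lvl => d.insert lvl PySem.Dict.empty) PySem.Dict.empty
  let levels := db1.foldl (fun d p =>
      p.2.foldl (fun d q =>
        if d.contains q.2 then
          d.modify q.2 PySem.Dict.empty (fun inner => (inner.setdefault q.1 []).modify q.1 [] (fun ns => ns ++ [p.1]))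
        else d) d) levels0
  (PySem.List.pyRange 5 0 (-1)).map (fun lvl =>
    (lvl, PySem.List.sorted ((levels.getD lvl PySem.Dict.empty).items.map
            (fun sv => (sv.1, PySem.List.sorted sv.2 (fun x => x) false)))
            (fun t => t.1) false))

-- ===== PRECONDITION & SPEC =====
def Spec_by_skill (db1 : List (String × List (String × Int))) (out : List (Int × (List (String × List String)))) : Prop := out = by_skill_alt db1
instance (db1 : List (String × List (String × Int))) (out : List (Int × (List (String × List String)))) : Decidable (Spec_by_skill db1 out) := by unfold Spec_by_skill; infer_instance

-- ===== CLAIM (what is proved, stated in full; the proofs are below) =====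
def Claim_equal_by_skill : Prop := ∀ (db1 : List (String × List (String × Int))), Dom_by_skill db1 → Spec_by_skill db1 (by_skill db1)

-- ===== LEMMAS AND PROOFS =====

-- the flattened (name, skill_name, skill_level) triples of the database
def triples (db1 : List (String × List (String × Int))) : List (String × String × Int) :=
  db1.flatMap (fun p => p.2.map (fun q => (p.1, q.1, q.2)))

-- a nested person/skill loop is a loop over the flattened triples
theorem nested_foldl_eq_triples {α : Type} (db1 : List (String × List (String × Int)))
    (f : α → (String × String × Int) → α) (init : α) :
    db1.foldl (fun a p => p.2.foldl (fun a q => f a (p.1, q.1, q.2)) a) init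
      = (triples db1).foldl f init := by
  induction db1 generalizing init with
  | nil => rfl
  | cons hd tl ih =>
      simp only [triples, List.flatMap_cons, List.foldl_append, List.foldl_cons, List.foldl_map]
      exact ih _

-- A's setdefault-by-hand is setdefault
theorem innerStepA_eq (d : PySem.Dict String (List String)) (name sn : String) :
    innerStepA d name sn = (d.setdefault sn []).modify sn [] (fun ns => ns ++ [name]) := by
  unfold innerStepA
  cases h : d.contains sn with
  | true => simp [h, PySem.Dict.setdefault_of_contains]
  | false => simp [h, PySem.Dict.setdefault_of_not_contains]

def bstep (d : PySem.Dict Int (PySem.Dict String (List String))) (t : String × String × Int) :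
    PySem.Dict Int (PySem.Dict String (List String)) :=
  if d.contains t.2.2 then
    d.modify t.2.2 PySem.Dict.empty (fun inner => (inner.setdefault t.2.1 []).modify t.2.1 [] (fun ns => ns ++ [t.1]))
  else d

-- projecting B's fold at a present level l gives A's filtered fold on that level
theorem getD_foldl_bstep (ts : List (String × String × Int))
    (d : PySem.Dict Int (PySem.Dict String (List String))) (l : Int)
    (hl : d.contains l = true) :
    (ts.foldl bstep d).getD l PySem.Dict.empty
      = ts.foldl (fun inner t => if t.2.2 == l then innerStepA inner t.1 t.2.1 else inner)
          (d.getD l PySem.Dict.empty) := by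
  induction ts generalizing d with
  | nil => rfl
  | cons t ts ih =>
      simp only [List.foldl_cons]
      cases hc : d.contains t.2.2 with
      | true =>
          rw [ih _ (by simp [bstep, hc, PySem.Dict.contains_modify, hl])]
          by_cases he : t.2.2 = l
          · subst he
            simp [bstep, hc, PySem.Dict.getD_modify_self, innerStepA_eq]
          · have he' : ¬ l = t.2.2 := fun h => he h.symm
            simp [bstep, hc, PySem.Dict.getD_modify, he, he']
      | false =>
          rw [ih _ (by simp [bstep, hc, hl])]
          have he : t.2.2 ≠ l := fun h => by rw [h, hl] at hc; exact absurd hc (by simp)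
          simp [bstep, hc, he]

theorem pyRange_concrete : PySem.List.pyRange 5 0 (-1) = [5, 4, 3, 2, 1] := by decide

def levels0 : PySem.Dict Int (PySem.Dict String (List String)) :=
  (PySem.List.pyRange 5 0 (-1)).foldl (fun d lvl => d.insert lvl PySem.Dict.empty) PySem.Dict.empty

theorem levels0_eq :
    levels0 = (((((PySem.Dict.empty.insert 5 PySem.Dict.empty).insert 4 PySem.Dict.empty).insert 3
      PySem.Dict.empty).insert 2 PySem.Dict.empty).insert 1 PySem.Dict.empty) := by
  rw [levels0, pyRange_concrete]; rfl

theorem contains_levels0 (l : Int) (hl : l ∈ ([5, 4, 3, 2, 1] : List Int)) :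
    levels0.contains l = true := by
  fin_cases hl <;> decide

theorem getD_levels0 (l : Int) : levels0.getD l PySem.Dict.empty = PySem.Dict.empty := by
  rw [levels0_eq]
  simp only [PySem.Dict.getD_insert, PySem.Dict.getD_empty]
  split_ifs <;> rfl

-- A's per-level grouping, as a fold over the flattened triples
def Alevel (db1 : List (String × List (String × Int))) (cl : Int) : PySem.Dict String (List String) :=
  (triples db1).foldl (fun inner t => if t.2.2 == cl then innerStepA inner t.1 t.2.1 else inner)
    PySem.Dict.empty

-- the shared rendering of one level's skill dict
def render (inner : PySem.Dict String (List String)) : List (String × List String) :=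
  PySem.List.sorted (inner.items.map (fun sv => (sv.1, PySem.List.sorted sv.2 (fun x => x) false)))
    (fun t => t.1) false

theorem A_form (db1 : List (String × List (String × Int))) :
    by_skill db1 = ([5, 4, 3, 2, 1] : List Int).map (fun cl => (cl, render (Alevel db1 cl))) := by
  simp only [by_skill, pyRange_concrete]
  have hnest : ∀ cl : Int,
      db1.foldl (fun inner p =>
        p.2.foldl (fun inner q => if q.2 == cl then innerStepA inner p.1 q.1 else inner) inner)
        PySem.Dict.empty = Alevel db1 cl := fun cl =>
    nested_foldl_eq_triples db1
      (fun inner t => if t.2.2 == cl then innerStepA inner t.1 t.2.1 else inner) PySem.Dict.empty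
  have hitems :
      (([5, 4, 3, 2, 1] : List Int).foldl (fun outer cl =>
        outer.insert cl (db1.foldl (fun inner p =>
          p.2.foldl (fun inner q => if q.2 == cl then innerStepA inner p.1 q.1 else inner) inner)
          PySem.Dict.empty)) PySem.Dict.empty).items
        = ([5, 4, 3, 2, 1] : List Int).map (fun cl => (cl, Alevel db1 cl)) := by
    have hfresh := PySem.Dict.items_foldl_insert_fresh ([5, 4, 3, 2, 1] : List Int)
      (fun cl => cl)
      (fun cl => db1.foldl (fun inner p =>
        p.2.foldl (fun inner q => if q.2 == cl then innerStepA inner p.1 q.1 else inner) inner)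
        PySem.Dict.empty)
      PySem.Dict.empty (fun a _ => by simp) (by decide)
    beta_reduce at hfresh
    rw [hfresh, show (PySem.Dict.empty : PySem.Dict Int (PySem.Dict String (List String))).items = []
      from rfl, List.nil_append]
    exact List.map_congr_left (fun cl _ => by rw [hnest cl])
  rw [hitems, List.map_map]
  have hpw : (([5, 4, 3, 2, 1] : List Int).map
      ((fun lv : Int × PySem.Dict String (List String) =>
        (lv.1, PySem.List.sorted (lv.2.items.map (fun sv => (sv.1, PySem.List.sorted sv.2 (fun x => x) false)))
          (fun t => t.1) false)) ∘ (fun cl => (cl, Alevel db1 cl)))).Pairwise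
      (fun a b => (fun t : Int × List (String × List String) => -t.1) a ≤ (fun t => -t.1) b) := by
    rw [List.pairwise_map]
    simp only [Function.comp]
    decide
  rw [PySem.List.sorted_eq_self_of_pairwise _ _ hpw]
  rfl

theorem B_form (db1 : List (String × List (String × Int))) :
    by_skill_alt db1 = ([5, 4, 3, 2, 1] : List Int).map (fun cl => (cl, render (Alevel db1 cl))) := by
  simp only [by_skill_alt, pyRange_concrete]
  have hlev :
      db1.foldl (fun d p =>
        p.2.foldl (fun d q =>
          if d.contains q.2 then
            d.modify q.2 PySem.Dict.empty
              (fun inner => (inner.setdefault q.1 []).modify q.1 [] (fun ns => ns ++ [p.1]))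
          else d) d) levels0 = (triples db1).foldl bstep levels0 :=
    nested_foldl_eq_triples db1 bstep levels0
  rw [show ([5,4,3,2,1] : List Int).foldl (fun d lvl => d.insert lvl PySem.Dict.empty) PySem.Dict.empty
        = levels0 from by rw [levels0, pyRange_concrete], hlev]
  refine List.map_congr_left (fun lvl hlvl => ?_)
  rw [getD_foldl_bstep (triples db1) levels0 lvl (contains_levels0 lvl hlvl), getD_levels0]
  rfl

-- ===== VERDICT (by name: the statement is the Claim_ definition above) =====
theorem by_skill_spec : Claim_equal_by_skill := by
  intro db1 _
  unfold Spec_by_skill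
  rw [A_form db1, B_form db1]
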